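-- pv_equiv track=rewrite | github.com/AndrewstheBuilder/AdventofCode2020 | day6pt2.py | process
-- ===== SOURCE A (Python) =====
-- def process( arr ):
--     a = []
--     temp = []
--     count = 0
--     for i in range( 0, len(arr)):
--         if( i == 0 ):
--             for char in arr[i]:
--                 a.append( char )
--             continue
--         for char in arr[i]:
--             if( not(char in a) ):
--                 continue
--             else:
--                 temp.append( char )
--         a = temp
--         temp = []
--     return len( a )
-- ===== SOURCE B (Python) =====
-- def process(arr):
--     if not arr:
--         return 0
--     n = len(arr)
--     if n == 1:
--         return len(arr[0])
--     seen = {}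
--     for line in arr[:-1]:
--         for c in set(line):
--             seen[c] = seen.get(c, 0) + 1
--     return sum(1 for c in arr[-1] if seen.get(c, 0) == n - 1)
-- ===== Notes on version B (the rewrite author's own statement) =====
-- stated objective: alternative
-- what changed: B builds one global counter of how many of the first n-1 lines contain each character, then counts characters of the last line whose tally equals n-1, instead of rebuilding a filtered character list line by line.
import Mathlib
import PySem

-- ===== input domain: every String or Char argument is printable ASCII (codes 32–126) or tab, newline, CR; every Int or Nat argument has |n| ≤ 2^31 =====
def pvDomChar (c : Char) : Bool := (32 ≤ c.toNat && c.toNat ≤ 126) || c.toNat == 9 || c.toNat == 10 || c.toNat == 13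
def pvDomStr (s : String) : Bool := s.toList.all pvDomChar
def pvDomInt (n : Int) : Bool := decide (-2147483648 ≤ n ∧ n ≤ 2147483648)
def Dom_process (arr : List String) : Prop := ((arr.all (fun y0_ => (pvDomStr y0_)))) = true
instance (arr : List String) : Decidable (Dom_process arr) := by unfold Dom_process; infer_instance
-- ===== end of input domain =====

-- B replaces A's line-by-line filtered-list rebuild by one global per-character counter of
-- how many of the first n-1 lines contain the character, then counts the last line's
-- characters whose tally is n-1 (objective: alternative).

-- ===== PORT A =====
def process (arr : List String) : Int :=
  let st : List Char × List Char :=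
    (List.range arr.length).foldl
      (fun (st : List Char × List Char) i =>
        if i = 0 then
          ((arr.getD i "").toList.foldl (fun a c => a ++ [c]) st.1, st.2)
        else
          let temp := (arr.getD i "").toList.foldl
            (fun tm c => if c ∈ st.1 then tm ++ [c] else tm) st.2
          (temp, []))
      ([], [])
  (st.1.length : Int)

-- ===== PORT B =====
def process_alt (arr : List String) : Int :=
  match arr with
  | [] => 0
  | h :: t =>
    let n := (h :: t).length
    if n = 1 then PySem.Str.len h
    else
      let seen : PySem.Dict Char Int :=
        ((h :: t).dropLast).foldl
          (fun (d : PySem.Dict Char Int) line =>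
            (PySem.Set.ofList line.toList).foldl
              (fun (d : PySem.Dict Char Int) c => PySem.Dict.modify d c 0 (· + 1)) d)
          (PySem.Dict.empty : PySem.Dict Char Int)
      ((h :: t).getLast (by simp)).toList.foldl
        (fun acc c => if PySem.Dict.getD seen c 0 = (n : Int) - 1 then acc + 1 else acc)
        (0 : Int)

-- ===== PRECONDITION & SPEC =====
def Spec_process (arr : List String) (out : Int) : Prop := out = process_alt arr
instance (arr : List String) (out : Int) : Decidable (Spec_process arr out) := by unfold Spec_process; infer_instance

-- ===== CLAIM (what is proved, stated in full; the proofs are below) =====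
def Claim_equal_process : Prop := ∀ (arr : List String), Dom_process arr → Spec_process arr (process arr)

-- ===== LEMMAS AND PROOFS =====

-- A's step on line `l`: keep the characters of `l` already present in `a`.
def pvStep (a : List Char) (l : String) : List Char := l.toList.filter (fun c => decide (c ∈ a))

-- an index loop reading t.getD i is the fold over t
theorem pvFoldRange {S : Type} (t : List String) (g : S → String → S) :
    ∀ s : S, (List.range t.length).foldl (fun s i => g s (t.getD i "")) s = t.foldl g s := by
  induction t with
  | nil => intro s; simp
  | cons l t ih =>
    intro s
    simp only [List.length_cons, List.range_succ_eq_map, List.foldl_cons, List.foldl_map,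
      List.getD_cons_zero, List.getD_cons_succ]
    exact ih (g s l)

theorem pvTailFold (t : List String) :
    ∀ a : List Char,
      t.foldl
        (fun (st : List Char × List Char) l =>
          (l.toList.foldl (fun tm c => if c ∈ st.1 then tm ++ [c] else tm) st.2, ([] : List Char)))
        (a, []) = (t.foldl pvStep a, []) := by
  induction t with
  | nil => intro a; simp
  | cons l t ih =>
    intro a
    simp only [List.foldl_cons]
    rw [PySem.List.foldl_append_ite_eq_filter, List.nil_append]
    exact ih (pvStep a l)

theorem pvProcessA (h : String) (t : List String) :
    process (h :: t) = ((t.foldl pvStep h.toList).length : Int) := by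
  simp only [process]
  have key : (List.range (h :: t).length).foldl
      (fun (st : List Char × List Char) i =>
        if i = 0 then
          (((h :: t).getD i "").toList.foldl (fun a c => a ++ [c]) st.1, st.2)
        else
          (((h :: t).getD i "").toList.foldl
            (fun tm c => if c ∈ st.1 then tm ++ [c] else tm) st.2, []))
      ([], []) = (t.foldl pvStep h.toList, []) := by
    simp only [List.length_cons, List.range_succ_eq_map, List.foldl_cons, List.foldl_map,
      List.getD_cons_zero, List.getD_cons_succ, Nat.succ_ne_zero, if_false,
      PySem.List.foldl_append_singleton_eq_self, List.nil_append]
    rw [pvFoldRange t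
      (fun (st : List Char × List Char) l =>
        (l.toList.foldl (fun tm c => if c ∈ st.1 then tm ++ [c] else tm) st.2, ([] : List Char)))]
    exact pvTailFold t h.toList
  rw [key]

-- membership in A's accumulated list = membership in every line so far
theorem pvMemA (u : List String) :
    ∀ (a : List Char) (c : Char),
      c ∈ u.foldl pvStep a ↔ c ∈ a ∧ ∀ l ∈ u, c ∈ l.toList := by
  induction u with
  | nil => intro a c; simp
  | cons l u ih =>
    intro a c
    simp only [List.foldl_cons, ih, pvStep, List.mem_filter, decide_eq_true_eq, List.mem_cons]
    constructor
    · rintro ⟨⟨hl, ha⟩, hu⟩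
      exact ⟨ha, fun x hx => by rcases hx with rfl | hx; exact hl; exact hu x hx⟩
    · rintro ⟨ha, hall⟩
      exact ⟨⟨hall l (Or.inl rfl), ha⟩, fun x hx => hall x (Or.inr hx)⟩

-- B's counter after the outer loop: tally of c = number of processed lines containing c
theorem pvSeen (u : List String) :
    ∀ (d : PySem.Dict Char Int) (c : Char),
      (u.foldl
        (fun (d : PySem.Dict Char Int) line =>
          (PySem.Set.ofList line.toList).foldl
            (fun (d : PySem.Dict Char Int) c => PySem.Dict.modify d c 0 (· + 1)) d)
        d).getD c 0
      = d.getD c 0 + ((u.countP (fun l => decide (c ∈ l.toList)) : Nat) : Int) := by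
  induction u with
  | nil => intro d c; simp
  | cons l u ih =>
    intro d c
    simp only [List.foldl_cons, List.countP_cons, ih]
    rw [PySem.Dict.getD_foldl_modify_add_one]
    have hc : ((PySem.Set.ofList l.toList : List Char).count c)
        = (if c ∈ l.toList then 1 else 0) := by
      by_cases hm : c ∈ l.toList
      · rw [if_pos hm]
        exact List.count_eq_one_of_mem (PySem.Set.nodup_ofList l.toList)
          ((PySem.Set.mem_ofList l.toList c).2 hm)
      · rw [if_neg hm, List.count_eq_zero]
        intro hcon
        exact hm ((PySem.Set.mem_ofList l.toList c).1 hcon)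
    rw [hc]
    push_cast
    simp only [decide_eq_true_eq]
    split_ifs <;> ring

-- ===== VERDICT (by name: the statement is the Claim_ definition above) =====
theorem process_spec : Claim_equal_process := by
  unfold Claim_equal_process Spec_process
  intro arr _
  cases arr with
  | nil => rfl
  | cons h t =>
    rw [pvProcessA]
    rcases List.eq_nil_or_concat t with rfl | ⟨u, x, rfl⟩
    · -- single line: A returns len(arr[0]); B takes the n = 1 branch
      simp [process_alt, PySem.Str.len_eq]
    · -- at least two lines: B takes the counter branch
      have hne : h :: u.concat x ≠ [] := by simp
      have hlast : (h :: u.concat x).getLast (by simp) = x := by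
        have h1 : (h :: u.concat x).getLast? = some x := by
          rw [List.concat_eq_append, ← List.cons_append, List.getLast?_concat]
        rw [List.getLast?_eq_some_getLast hne] at h1
        exact Option.some.inj h1
      have hdrop : (h :: u.concat x).dropLast = h :: u := by
        rw [List.concat_eq_append, ← List.cons_append, List.dropLast_concat]
      have hlen : (h :: u.concat x).length = u.length + 2 := by simp
      simp only [process_alt, hlast, hdrop, hlen]
      rw [if_neg (by omega)]
      rw [PySem.List.foldl_ite_add_one]
      have hA : (u.concat x).foldl pvStep h.toList = pvStep (u.foldl pvStep h.toList) x := by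
        rw [List.concat_eq_append, List.foldl_append, List.foldl_cons, List.foldl_nil]
      rw [hA]
      simp only [pvStep, zero_add]
      rw [← List.countP_eq_length_filter]
      congr 1
      apply List.countP_congr
      intro c hc
      simp only [decide_eq_true_eq]
      rw [pvSeen (h :: u) (PySem.Dict.empty : PySem.Dict Char Int) c]
      have h0 : ((PySem.Dict.empty : PySem.Dict Char Int)).getD c 0 = 0 := rfl
      rw [h0, zero_add]
      have hcnt : ((h :: u).countP (fun l => decide (c ∈ l.toList)) = u.length + 1)
          ↔ (∀ l ∈ h :: u, c ∈ l.toList) := by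
        have hlc : (h :: u).length = u.length + 1 := by simp
        rw [← hlc, List.countP_eq_length]
        simp
      have hmem := pvMemA u h.toList c
      constructor
      · intro hIn
        rcases hmem.1 hIn with ⟨hh, hu⟩
        have : (h :: u).countP (fun l => decide (c ∈ l.toList)) = u.length + 1 :=
          hcnt.2 (by intro l hl; rcases List.mem_cons.1 hl with rfl | hl; exact hh; exact hu l hl)
        push_cast
        omega
      · intro hEq
        have : (h :: u).countP (fun l => decide (c ∈ l.toList)) = u.length + 1 := by
          push_cast at hEq; omega
        rcases hcnt.1 this with hall
        exact hmem.2 ⟨hall h (List.mem_cons_self), fun l hl => hall l (List.mem_cons_of_mem _ hl)⟩
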